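-- pv_equiv track=rewrite | github.com/miliar/Code_Jam_Webscraper | solutions_python/solutions_year15_round0_nr3/520.py | reduces_to_minus1
-- ===== SOURCE A (Python) =====
-- def multiply(char1, char2):
--     if char1 == '1':
--         return (1, char2)
--
--     if char2 == '1':
--         return (1, char1)
--
--     if char1 == char2:
--         return (-1, '1')
--
--     if char1 == 'i':
--         if char2 == 'j':
--             return (1, 'k')
--         else:
--             return (-1, 'j')
--
--     if char1 == 'j':
--         if char2 == 'i':
--             return (-1, 'k')
--         else:
--             return (1, 'i')
--
--     if char1 == 'k':
--         if char2 == 'i':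
--             return (1, 'j')
--         elif char2 == 'j':
--             return (-1, 'i')
--
-- def reduces_to_minus1(sign, prefix, times, st):
--     times_left = times
--     current = '1'
--     cur_sign = 1
--     cur_pref = prefix
--
--     while times_left > 0 or len(cur_pref) > 0:
--         if len(cur_pref) == 0:
--             cur_pref = st
--             times_left -= 1
--
--         n_s, current = multiply(current, cur_pref[0])
--         cur_pref = cur_pref[1:]
--         cur_sign *= n_s
--
--     return cur_sign == sign and current == '1'
-- ===== SOURCE B (Python) =====
-- _IDX = {'1': 0, 'i': 1, 'j': 2, 'k': 3}
-- _MUL_IDX = ((0, 1, 2, 3), (1, 0, 3, 2), (2, 3, 0, 1), (3, 2, 1, 0))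
-- _MUL_SGN = ((1, 1, 1, 1), (1, -1, 1, -1), (1, -1, -1, 1), (1, 1, -1, -1))
--
--
-- def _qmul(a, b):
--     sa, ia = a
--     sb, ib = b
--     return (sa * sb * _MUL_SGN[ia][ib], _MUL_IDX[ia][ib])
--
--
-- def _qprod(s):
--     r = (1, 0)
--     for c in s:
--         r = _qmul(r, (1, _IDX[c]))
--     return r
--
--
-- def reduces_to_minus1(sign, prefix, times, st):
--     p = _qprod(prefix)
--     if times > 0:
--         q = _qprod(st)
--         r = (1, 0)
--         for _ in range(times % 4):
--             r = _qmul(r, q)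
--         p = _qmul(p, r)
--     return p == (sign, 0)
-- ===== Notes on version B (the rewrite author's own statement) =====
-- stated objective: faster
-- what changed: Instead of walking character by character through all `times` repetitions of st, B computes one quaternion (sign, unit-index) product per string via index tables and raises the st-block product to times mod 4 (every Q8 element has order dividing 4), applying it once.
-- outside the precondition, e.g. on reduces_to_minus1(-1, 'xx', 0, 'i'): A returns True, B raises KeyError
import Mathlib
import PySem

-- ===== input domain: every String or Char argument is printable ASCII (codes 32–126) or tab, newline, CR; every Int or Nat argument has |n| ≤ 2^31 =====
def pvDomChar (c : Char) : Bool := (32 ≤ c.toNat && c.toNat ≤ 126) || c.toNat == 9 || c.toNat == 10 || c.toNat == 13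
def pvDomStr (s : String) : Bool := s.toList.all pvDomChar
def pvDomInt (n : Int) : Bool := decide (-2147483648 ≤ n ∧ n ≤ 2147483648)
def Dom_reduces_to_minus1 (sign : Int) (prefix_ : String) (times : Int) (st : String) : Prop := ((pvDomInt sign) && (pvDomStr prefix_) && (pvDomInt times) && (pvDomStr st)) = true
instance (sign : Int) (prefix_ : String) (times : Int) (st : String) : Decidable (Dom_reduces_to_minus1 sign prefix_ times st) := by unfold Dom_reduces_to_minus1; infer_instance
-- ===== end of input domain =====

-- B replaces A's char-by-char walk over the `times` repetitions of `st` by one quaternion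
-- product per string plus an exponent reduced mod 4 (the order of any Q8 element divides 4);
-- objective: faster (O(len(prefix)+len(st)) instead of O(len(prefix)+times*len(st))).

-- ===== PORT A =====
def pyMultiply (c1 c2 : Char) : Int × Char :=
  if c1 = '1' then (1, c2)
  else if c2 = '1' then (1, c1)
  else if c1 = c2 then (-1, '1')
  else if c1 = 'i' then (if c2 = 'j' then (1, 'k') else (-1, 'j'))
  else if c1 = 'j' then (if c2 = 'i' then (-1, 'k') else (1, 'i'))
  else if c1 = 'k' then (if c2 = 'i' then (1, 'j') else if c2 = 'j' then (-1, 'i') else (1, '?'))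
  else (1, '?')  -- Python's multiply returns None here and the caller raises; unreachable under Pre_

def loopA (timesLeft : Int) (current : Char) (curSign : Int) (curPref st : List Char) : Int × Char :=
  match curPref with
  | c :: rest =>
    loopA timesLeft (pyMultiply current c).2 (curSign * (pyMultiply current c).1) rest st
  | [] =>
    if 0 < timesLeft then
      match st with
      | c :: rest =>
        loopA (timesLeft - 1) (pyMultiply current c).2 (curSign * (pyMultiply current c).1) rest st
      | [] => (curSign, current)  -- Python raises IndexError here; excluded by Pre_
    else (curSign, current)
termination_by (timesLeft.toNat, curPref.length)
decreasing_by
  · exact Prod.Lex.right _ (by simp)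
  · exact Prod.Lex.left _ _ (by omega)

def reduces_to_minus1 (sign : Int) (prefix_ : String) (times : Int) (st : String) : Bool :=
  let r := loopA times '1' 1 prefix_.toList st.toList
  r.1 == sign && r.2 == '1'

-- ===== PORT B =====
def charIdx (c : Char) : Int :=
  if c = '1' then 0 else if c = 'i' then 1 else if c = 'j' then 2
  else if c = 'k' then 3 else 0  -- Python raises KeyError on other chars; unreachable under Pre_

def mulIdxT : List (List Int) := [[0,1,2,3],[1,0,3,2],[2,3,0,1],[3,2,1,0]]
def mulSgnT : List (List Int) := [[1,1,1,1],[1,-1,1,-1],[1,-1,-1,1],[1,1,-1,-1]]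
def tget (t : List (List Int)) (i j : Int) : Int := (t.getD i.toNat []).getD j.toNat 0

def qmul (a b : Int × Int) : Int × Int :=
  (a.1 * b.1 * tget mulSgnT a.2 b.2, tget mulIdxT a.2 b.2)

def qprod (s : List Char) : Int × Int := s.foldl (fun r c => qmul r (1, charIdx c)) (1, 0)

def reduces_to_minus1_alt (sign : Int) (prefix_ : String) (times : Int) (st : String) : Bool :=
  (if 0 < times then
    qmul (qprod prefix_.toList)
      ((List.range (PySem.Int.mod times 4).toNat).foldl
        (fun r _ => qmul r (qprod st.toList)) (1, 0))
  else qprod prefix_.toList) == ((sign, 0) : Int × Int)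

-- ===== PRECONDITION & SPEC =====
def QChars : List Char := ['1', 'i', 'j', 'k']

-- Pre_ excludes inputs with a character outside '1ijk' — Python A raises a TypeError on almost
-- all of them and returns an accidental value on a few self-cancelling ones (any char squares
-- to -1 in A's first-match branches) — and times > 0 with st = "", where A raises IndexError.
def Pre_reduces_to_minus1 (sign : Int) (prefix_ : String) (times : Int) (st : String) : Prop :=
  prefix_.toList.all (fun c => QChars.contains c) = true ∧
    (0 < times → st.toList ≠ [] ∧ st.toList.all (fun c => QChars.contains c) = true)
instance (sign : Int) (prefix_ : String) (times : Int) (st : String) : Decidable (Pre_reduces_to_minus1 sign prefix_ times st) := by unfold Pre_reduces_to_minus1; infer_instance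

def pvWitness_reduces_to_minus1 : Int × String × Int × String := (-1, "ij", 3, "k")

def Spec_reduces_to_minus1 (sign : Int) (prefix_ : String) (times : Int) (st : String) (out : Bool) : Prop := out = reduces_to_minus1_alt sign prefix_ times st
instance (sign : Int) (prefix_ : String) (times : Int) (st : String) (out : Bool) : Decidable (Spec_reduces_to_minus1 sign prefix_ times st out) := by unfold Spec_reduces_to_minus1; infer_instance

-- ===== CLAIM (what is proved, stated in full; the proofs are below) =====
def Claim_equal_reduces_to_minus1 : Prop := ∀ (sign : Int) (prefix_ : String) (times : Int) (st : String), Dom_reduces_to_minus1 sign prefix_ times st → Pre_reduces_to_minus1 sign prefix_ times st → Spec_reduces_to_minus1 sign prefix_ times st (reduces_to_minus1 sign prefix_ times st)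

-- ===== LEMMAS AND PROOFS =====

-- A's loop step as a fold step over (sign, current).
def aStep (p : Int × Char) (c : Char) : Int × Char :=
  (p.1 * (pyMultiply p.2 c).1, (pyMultiply p.2 c).2)

-- B's fold step.
def bStep (r : Int × Int) (c : Char) : Int × Int := qmul r (1, charIdx c)

-- left power of q
def pw (q : Int × Int) : Nat → Int × Int
  | 0 => (1, 0)
  | n + 1 => qmul q (pw q n)

def vI (p : Int × Int) : Prop := p.2 ∈ ([0, 1, 2, 3] : List Int)

lemma loopA_prefix (pref : List Char) : ∀ (t : Int) (cur : Char) (s : Int) (st : List Char),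
    loopA t cur s pref st
      = loopA t (pref.foldl aStep (s, cur)).2 (pref.foldl aStep (s, cur)).1 [] st := by
  induction pref with
  | nil => intro t cur s st; rfl
  | cons c rest ih =>
    intro t cur s st
    rw [loopA]
    simpa [aStep] using ih t (pyMultiply cur c).2 (s * (pyMultiply cur c).1) st

lemma loopA_done (t : Int) (cur : Char) (s : Int) (st : List Char) :
    loopA t cur s [] st = (List.flatten (List.replicate t.toNat st)).foldl aStep (s, cur) := by
  generalize hn : t.toNat = n
  induction n generalizing t cur s with
  | zero =>
    have ht : ¬ 0 < t := by omega
    rw [loopA.eq_def]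
    simp [ht]
  | succ n ih =>
    have ht : 0 < t := by omega
    cases st with
    | nil =>
      rw [loopA.eq_def]
      simp [ht]
    | cons c rest =>
      rw [loopA.eq_def]
      simp only [if_pos ht]
      rw [loopA_prefix, ih (t - 1) _ _ (by omega), Prod.mk.eta,
        List.replicate_succ, List.flatten_cons, List.foldl_append]
      congr 1

lemma charIdx_mem (c : Char) : charIdx c ∈ ([0, 1, 2, 3] : List Int) := by
  unfold charIdx; split_ifs <;> decide

lemma homAB (s : Int) (cur c : Char) (hcur : cur ∈ QChars) (hc : c ∈ QChars) :
    bStep (s, charIdx cur) c = ((aStep (s, cur) c).1, charIdx (aStep (s, cur) c).2)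
      ∧ (aStep (s, cur) c).2 ∈ QChars := by
  simp only [QChars, List.mem_cons, List.not_mem_nil, or_false] at hcur hc
  rcases hcur with rfl | rfl | rfl | rfl <;> rcases hc with rfl | rfl | rfl | rfl <;>
    refine ⟨?_, by simp [aStep, pyMultiply, QChars]⟩ <;>
    · simp [bStep, aStep, pyMultiply, qmul, charIdx, tget, mulSgnT, mulIdxT]
      try ring

lemma foldAB (l : List Char) : ∀ (s : Int) (cur : Char), cur ∈ QChars →
    (∀ c ∈ l, c ∈ QChars) →
    (l.foldl aStep (s, cur)).2 ∈ QChars ∧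
      l.foldl bStep (s, charIdx cur) = ((l.foldl aStep (s, cur)).1, charIdx (l.foldl aStep (s, cur)).2) := by
  induction l with
  | nil => intro s cur h _; exact ⟨h, rfl⟩
  | cons c rest ih =>
    intro s cur hcur hl
    have h1 := homAB s cur c hcur (hl c (by simp))
    have h2 := ih (aStep (s, cur) c).1 (aStep (s, cur) c).2 h1.2 (fun d hd => hl d (by simp [hd]))
    constructor
    · simpa [aStep] using h2.1
    · calc (c :: rest).foldl bStep (s, charIdx cur)
          = rest.foldl bStep (bStep (s, charIdx cur) c) := by simp
        _ = rest.foldl bStep ((aStep (s, cur) c).1, charIdx (aStep (s, cur) c).2) := by rw [h1.1]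
        _ = _ := by simpa [aStep] using h2.2

lemma vI_qmul {a b : Int × Int} (ha : vI a) (hb : vI b) : vI (qmul a b) := by
  unfold vI at *
  obtain ⟨sa, ia⟩ := a; obtain ⟨sb, ib⟩ := b
  simp only at ha hb
  fin_cases ha <;> fin_cases hb <;> norm_num [qmul, tget, mulSgnT, mulIdxT, show Int.toNat 2 = 2 from rfl, show Int.toNat 3 = 3 from rfl]

lemma qmul_one_left {q : Int × Int} (hq : vI q) : qmul (1, 0) q = q := by
  obtain ⟨s, i⟩ := q
  unfold vI at hq; simp only at hq
  fin_cases hq <;> · simp [qmul, tget, mulSgnT, mulIdxT]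

lemma qmul_one_right {q : Int × Int} (hq : vI q) : qmul q (1, 0) = q := by
  obtain ⟨s, i⟩ := q
  unfold vI at hq; simp only at hq
  fin_cases hq <;> · simp [qmul, tget, mulSgnT, mulIdxT]

lemma qmul_assoc {a b c : Int × Int} (ha : vI a) (hb : vI b) (hc : vI c) :
    qmul (qmul a b) c = qmul a (qmul b c) := by
  obtain ⟨sa, ia⟩ := a; obtain ⟨sb, ib⟩ := b; obtain ⟨sc, ic⟩ := c
  unfold vI at ha hb hc; simp only at ha hb hc
  fin_cases ha <;> fin_cases hb <;> fin_cases hc <;>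
    · simp [qmul, tget, mulSgnT, mulIdxT]; ring

lemma vI_bStep {r : Int × Int} (hr : vI r) (c : Char) : vI (bStep r c) :=
  vI_qmul hr (by simpa [vI] using charIdx_mem c)

lemma vI_fold {l : List Char} : ∀ {r : Int × Int}, vI r → vI (l.foldl bStep r) := by
  induction l with
  | nil => intro r h; exact h
  | cons c rest ih => intro r h; exact ih (vI_bStep h c)

lemma fold_linear (l : List Char) : ∀ (r : Int × Int), vI r →
    l.foldl bStep r = qmul r (l.foldl bStep (1, 0)) := by
  induction l with
  | nil => intro r h; exact (qmul_one_right h).symm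
  | cons c rest ih =>
    intro r h
    have hc : vI ((1, charIdx c) : Int × Int) := by simpa [vI] using charIdx_mem c
    have hone : vI ((1, 0) : Int × Int) := by unfold vI; decide
    have hb1 : bStep (1, 0) c = (1, charIdx c) := qmul_one_left hc
    calc (c :: rest).foldl bStep r = rest.foldl bStep (bStep r c) := by simp
      _ = qmul (qmul r (1, charIdx c)) (rest.foldl bStep (1, 0)) := ih _ (vI_bStep h c)
      _ = qmul r (qmul (1, charIdx c) (rest.foldl bStep (1, 0))) := qmul_assoc h hc (vI_fold hone)
      _ = qmul r (rest.foldl bStep (1, charIdx c)) := by rw [ih _ hc]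
      _ = qmul r ((c :: rest).foldl bStep (1, 0)) := by rw [List.foldl_cons, hb1]

lemma vI_pw {q : Int × Int} (hq : vI q) (n : Nat) : vI (pw q n) := by
  induction n with
  | zero => exact (by unfold vI; decide : vI ((1, 0) : Int × Int))
  | succ n ih => exact vI_qmul hq ih

lemma pw_add {q : Int × Int} (hq : vI q) (m n : Nat) :
    pw q (m + n) = qmul (pw q m) (pw q n) := by
  induction m with
  | zero => simpa using (qmul_one_left (vI_pw hq n)).symm
  | succ m ih =>
    have : m + 1 + n = (m + n) + 1 := by omega
    rw [this, pw, ih, pw, qmul_assoc hq (vI_pw hq m) (vI_pw hq n)]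

def vS (p : Int × Int) : Prop := p.1 = 1 ∨ p.1 = -1

lemma vS_fold {l : List Char} : ∀ {r : Int × Int}, vI r → vS r → vS (l.foldl bStep r) := by
  induction l with
  | nil => intro r _ h; exact h
  | cons c rest ih =>
    intro r hI hS
    refine ih (vI_bStep hI c) ?_
    obtain ⟨s, i⟩ := r
    unfold vI at hI; simp only at hI
    have hc := charIdx_mem c
    unfold vS at hS ⊢
    simp only at hS
    fin_cases hI <;> rcases (by simpa using hc : charIdx c = 0 ∨ charIdx c = 1 ∨ charIdx c = 2 ∨ charIdx c = 3) with h | h | h | h <;>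
      rcases hS with rfl | rfl <;> simp [bStep, qmul, h, tget, mulSgnT, mulIdxT]

lemma pw_four {q : Int × Int} (hI : vI q) (hS : vS q) : pw q 4 = (1, 0) := by
  obtain ⟨s, i⟩ := q
  unfold vI at hI; unfold vS at hS; simp only at hI hS
  fin_cases hI <;> rcases hS with rfl | rfl <;> decide

lemma pw_mod_four {q : Int × Int} (hI : vI q) (hS : vS q) (n : Nat) :
    pw q n = pw q (n % 4) := by
  conv_lhs => rw [show n = 4 * (n / 4) + n % 4 from (Nat.div_add_mod n 4).symm]
  rw [pw_add hI]
  have h4 : ∀ k, pw q (4 * k) = (1, 0) := by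
    intro k
    induction k with
    | zero => rfl
    | succ k ih =>
      have : 4 * (k + 1) = 4 * k + 4 := by omega
      rw [this, pw_add hI, ih, pw_four hI hS, qmul_one_left (by unfold vI; decide)]
  rw [h4, qmul_one_left (vI_pw hI _)]

lemma range_fold_pw (q : Int × Int) (hq : vI q) (e : Nat) :
    (List.range e).foldl (fun r _ => qmul r q) (1, 0) = pw q e := by
  have comm : ∀ n, qmul q (pw q n) = qmul (pw q n) q := by
    intro n
    induction n with
    | zero => rw [pw, qmul_one_left hq, qmul_one_right hq]
    | succ n ih =>
      rw [pw, qmul_assoc hq (vI_pw hq n) hq, ← ih]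
  induction e with
  | zero => rfl
  | succ e ih => rw [List.range_succ, List.foldl_append, ih, List.foldl_cons, List.foldl_nil, ← comm, ← pw]

lemma flatten_fold (st : List Char) (q : Int × Int) (hq : q = st.foldl bStep (1, 0)) :
    ∀ n, (List.flatten (List.replicate n st)).foldl bStep (1, 0) = pw q n := by
  have hqI : vI q := hq ▸ vI_fold (by unfold vI; decide)
  intro n
  induction n with
  | zero => rfl
  | succ n ih =>
    rw [List.replicate_succ, List.flatten_cons, List.foldl_append, ← hq,
      fold_linear _ _ hqI, ih, pw]

-- final Bool comparison on matched states
lemma final_eq (a : Int × Char) (ha : a.2 ∈ QChars) (sign : Int) :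
    ((a.1 == sign && a.2 == '1')) = (((a.1, charIdx a.2) : Int × Int) == ((sign, 0) : Int × Int)) := by
  obtain ⟨s, c⟩ := a
  simp only [QChars, List.mem_cons, List.not_mem_nil, or_false] at ha
  rcases ha with rfl | rfl | rfl | rfl <;> simp [charIdx]

-- ===== VERDICT (by name: the statement is the Claim_ definition above) =====
lemma qprod_eq (l : List Char) : qprod l = l.foldl bStep (1, 0) := rfl

lemma all_mem {l : List Char} (h : l.all (fun c => QChars.contains c) = true) :
    ∀ c ∈ l, c ∈ QChars := by
  intro c hc
  have := List.all_eq_true.mp h c hc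
  simpa using this

theorem reduces_to_minus1_spec : Claim_equal_reduces_to_minus1 := by
  intro sign prefix_ times st _ hpre
  unfold Spec_reduces_to_minus1 reduces_to_minus1 reduces_to_minus1_alt
  obtain ⟨hp, hst⟩ := hpre
  have hp' := all_mem hp
  have hone : vI ((1, 0) : Int × Int) := by unfold vI; decide
  have h1 : loopA times '1' 1 prefix_.toList st.toList
      = (prefix_.toList ++ List.flatten (List.replicate times.toNat st.toList)).foldl aStep (1, '1') := by
    rw [loopA_prefix, loopA_done, Prod.mk.eta, List.foldl_append]
  by_cases ht : 0 < times
  · obtain ⟨hne, hstall⟩ := hst ht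
    have hst' := all_mem hstall
    set L := prefix_.toList ++ List.flatten (List.replicate times.toNat st.toList) with hL
    have hLmem : ∀ c ∈ L, c ∈ QChars := by
      intro c hc
      rcases List.mem_append.mp hc with h | h
      · exact hp' c h
      · obtain ⟨l, hl, hcl⟩ := List.mem_flatten.mp h
        exact hst' c ((List.eq_of_mem_replicate hl) ▸ hcl)
    have hfold := foldAB L 1 '1' (by decide) hLmem
    have hsplit : L.foldl bStep (1, 0) =
        qmul (prefix_.toList.foldl bStep (1, 0)) (pw (qprod st.toList) times.toNat) := by
      rw [hL, List.foldl_append, fold_linear _ _ (vI_fold hone),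
        fold_linear _ _ hone, qmul_one_left (vI_fold hone),
        flatten_fold st.toList (qprod st.toList) rfl]
    have hqI : vI (qprod st.toList) := vI_fold hone
    have hqS : vS (qprod st.toList) := vS_fold hone (Or.inl rfl)
    have he : (PySem.Int.mod times 4).toNat = times.toNat % 4 := by
      rw [PySem.Int.mod_eq_emod_of_pos (by omega)]
      omega
    rw [h1, final_eq _ hfold.1 sign, ← hfold.2,
      show charIdx '1' = (0 : Int) from rfl, hsplit, if_pos ht,
      range_fold_pw _ hqI, he, ← pw_mod_four hqI hqS, qprod_eq]
    rfl
  · have hzero : times.toNat = 0 := by omega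
    rw [h1, hzero]
    simp only [List.replicate_zero, List.flatten_nil, List.append_nil]
    have hfold := foldAB prefix_.toList 1 '1' (by decide) hp'
    rw [final_eq _ hfold.1 sign, ← hfold.2,
      show charIdx '1' = (0 : Int) from rfl, if_neg ht, qprod_eq]
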